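-- pv_equiv track=rewrite | github.com/DBeltranGonzalez/python_aprendizaje | Dia-5_mayor_pal.py | find_largest_palindrome
-- ===== SOURCE A (Python) =====
-- def find_largest_palindrome(words):
--     reverse = ''
--     mayor = 0
--     largest = ''
--     for i in words:
--         size = 0
--         reverse = i[::-1]
--         if i == reverse:
--             size = len(i)
--             if size > mayor:
--                 mayor = size
--                 largest = i
--     if mayor == 0:
--         return None
--     else:
--         return largest
-- ===== SOURCE B (Python) =====
-- def _is_palindrome(w):
--     i, j = 0, len(w) - 1
--     while i < j:
--         if w[i] != w[j]:
--             return False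
--         i += 1
--         j -= 1
--     return True
--
-- def find_largest_palindrome(words):
--     cands = sorted((w for w in words if w and _is_palindrome(w)),
--                    key=len, reverse=True)
--     return cands[0] if cands else None
-- ===== Notes on version B (the rewrite author's own statement) =====
-- stated objective: alternative
-- what changed: B replaces A's single interleaved loop (slice-reversal palindrome test plus a running mayor/largest maximum) by a two-pointer index-walk palindrome check and a stable descending sort by length whose first element is the answer (stability preserves A's strict-> first-occurrence tie-break).
import Mathlib
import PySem

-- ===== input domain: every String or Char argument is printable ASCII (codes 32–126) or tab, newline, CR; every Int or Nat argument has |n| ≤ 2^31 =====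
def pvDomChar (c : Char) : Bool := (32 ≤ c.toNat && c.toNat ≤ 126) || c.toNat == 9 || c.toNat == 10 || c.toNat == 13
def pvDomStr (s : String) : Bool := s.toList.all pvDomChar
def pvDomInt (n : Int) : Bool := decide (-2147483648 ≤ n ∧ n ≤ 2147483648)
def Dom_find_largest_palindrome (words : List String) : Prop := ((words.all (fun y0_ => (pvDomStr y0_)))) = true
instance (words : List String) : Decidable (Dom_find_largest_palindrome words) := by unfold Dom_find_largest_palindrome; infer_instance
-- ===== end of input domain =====

-- ===== PORT A =====
-- B checks palindromes with a two-pointer index loop and selects by a stable descending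
-- length sort instead of A's interleaved slice-reverse-and-running-max loop; objective: alternative.
def find_largest_palindrome (words : List String) : Option String :=
  let st := words.foldl (fun (s : Int × String) i =>
    let reverse := (PySem.Str.slice? i none none (-1)).getD ""   -- i[::-1]; step -1 slice never raises
    if i == reverse then
      let size := PySem.Str.len i
      if size > s.1 then (size, i) else s
    else s) (0, "")
  if st.1 = 0 then none else some st.2

-- ===== PORT B =====
-- _is_palindrome: the two-pointer while loop; w[i]/w[j] are in range whenever the loop
-- body runs (0 ≤ i < j ≤ len w - 1), so the IndexError branch (none) is unreachable.
def pvIsPalAux (cs : List Char) (i j : Int) : Bool :=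
  if i < j then
    match PySem.List.pyGet? cs i, PySem.List.pyGet? cs j with
    | some a, some b => if a != b then false else pvIsPalAux cs (i + 1) (j - 1)
    | _, _ => false
  else true
termination_by (j - i).toNat
decreasing_by omega

def pvIsPalindrome (w : String) : Bool := pvIsPalAux w.toList 0 (PySem.Str.len w - 1)

def find_largest_palindrome_alt (words : List String) : Option String :=
  let cands := PySem.List.sorted (words.filter (fun w => (w != "") && pvIsPalindrome w)) PySem.Str.len true
  match cands with
  | [] => none
  | m :: _ => some m

-- ===== PRECONDITION & SPEC =====
def Spec_find_largest_palindrome (words : List String) (out : Option String) : Prop := out = find_largest_palindrome_alt words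
instance (words : List String) (out : Option String) : Decidable (Spec_find_largest_palindrome words out) := by unfold Spec_find_largest_palindrome; infer_instance

-- ===== CLAIM (what is proved, stated in full; the proofs are below) =====
def Claim_equal_find_largest_palindrome : Prop := ∀ (words : List String), Dom_find_largest_palindrome words → Spec_find_largest_palindrome words (find_largest_palindrome words)

-- ===== LEMMAS AND PROOFS =====

-- A's candidate test, as a named predicate for the proofs
def pvIsCand (w : String) : Bool :=
  (w != "") && (w == (PySem.Str.slice? w none none (-1)).getD "")

-- the two-pointer loop, once the pointers have met or crossed
theorem pvIsPalAux_stop (cs : List Char) (i j : Int)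
    (hs : i + j = (cs.length : Int) - 1) (hij : ¬ i < j) :
    (pvIsPalAux cs i j = true ↔
      ∀ k : Nat, i ≤ (k : Int) → (k : Int) ≤ j → cs[k]? = cs[cs.length - 1 - k]?) := by
  rw [pvIsPalAux, if_neg hij]
  constructor
  · intro _ k hk1 hk2
    have hkk : cs.length - 1 - k = k := by omega
    rw [hkk]
  · intro _
    rfl

-- the two-pointer loop decides exactly the pairwise mirror condition on [i, j]
theorem pvIsPalAux_iff (cs : List Char) (n : Nat) (i j : Int) (hn : (j - i).toNat ≤ n)
    (hi : 0 ≤ i) (hs : i + j = (cs.length : Int) - 1) :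
    (pvIsPalAux cs i j = true ↔
      ∀ k : Nat, i ≤ (k : Int) → (k : Int) ≤ j → cs[k]? = cs[cs.length - 1 - k]?) := by
  induction n generalizing i j with
  | zero => exact pvIsPalAux_stop cs i j hs (by omega)
  | succ n ih =>
    by_cases hij : i < j
    case neg => exact pvIsPalAux_stop cs i j hs hij
    · have hgi : PySem.List.pyGet? cs i = some cs[i.toNat] :=
        PySem.List.pyGet?_eq_some_getElem cs hi (by omega)
      have hgj : PySem.List.pyGet? cs j = some cs[j.toNat] :=
        PySem.List.pyGet?_eq_some_getElem cs (by omega) (by omega)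
      rw [pvIsPalAux, if_pos hij, hgi, hgj]
      by_cases heq : cs[i.toNat] = cs[j.toNat]
      · have hbne : (cs[i.toNat] != cs[j.toNat]) = false := by simp [heq]
        have hred : (match some cs[i.toNat], some cs[j.toNat] with
            | some a, some b => if (a != b) = true then false else pvIsPalAux cs (i + 1) (j - 1)
            | _, _ => false)
            = (if (cs[i.toNat] != cs[j.toNat]) = true then false else pvIsPalAux cs (i + 1) (j - 1)) := rfl
        rw [hred, hbne]
        simp only [Bool.false_eq_true, if_false]
        rw [ih (i + 1) (j - 1) (by omega) (by omega) (by omega)]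
        constructor
        · intro hmid k hk1 hk2
          by_cases hki : (k : Int) = i
          · have hkt : k = i.toNat := by omega
            have hjk : cs.length - 1 - k = j.toNat := by omega
            subst hkt
            rw [hjk, List.getElem?_eq_getElem (by omega), List.getElem?_eq_getElem (by omega)]
            exact congrArg some heq
          · by_cases hkj : (k : Int) = j
            · have hkt : k = j.toNat := by omega
              have hik : cs.length - 1 - k = i.toNat := by omega
              subst hkt
              rw [hik, List.getElem?_eq_getElem (by omega), List.getElem?_eq_getElem (by omega)]
              exact congrArg some heq.symm
            · exact hmid k (by omega) (by omega)
        · intro hall k hk1 hk2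
          exact hall k (by omega) (by omega)
      · have hbne : (cs[i.toNat] != cs[j.toNat]) = true := by simp [heq]
        have hred : (match some cs[i.toNat], some cs[j.toNat] with
            | some a, some b => if (a != b) = true then false else pvIsPalAux cs (i + 1) (j - 1)
            | _, _ => false)
            = (if (cs[i.toNat] != cs[j.toNat]) = true then false else pvIsPalAux cs (i + 1) (j - 1)) := rfl
        rw [hred, hbne]
        rw [if_pos rfl]
        simp only [Bool.false_eq_true, false_iff]
        push Not
        refine ⟨i.toNat, by omega, by omega, ?_⟩
        have hjk : cs.length - 1 - i.toNat = j.toNat := by omega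
        rw [hjk, List.getElem?_eq_getElem (by omega), List.getElem?_eq_getElem (by omega)]
        intro hcontra
        exact heq (Option.some.inj hcontra)

-- B's palindrome test equals A's slice-reversal test
theorem pvIsPalindrome_eq (w : String) :
    pvIsPalindrome w = (w == (PySem.Str.slice? w none none (-1)).getD "") := by
  rw [PySem.Str.slice?_none_none_neg_one]
  rw [Bool.eq_iff_iff]
  have hlen : PySem.Str.len w = (w.toList.length : Int) := by simp [PySem.Str.len]
  have hmain := pvIsPalAux_iff w.toList w.toList.length 0 ((w.toList.length : Int) - 1)
    (by omega) le_rfl (by omega)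
  have hL : pvIsPalindrome w = pvIsPalAux w.toList 0 ((w.toList.length : Int) - 1) := by
    rw [pvIsPalindrome, hlen]
  have hR : (w == (some (String.ofList w.toList.reverse)).getD "") = true ↔
      w.toList.reverse = w.toList := by
    simp only [Option.getD_some, beq_iff_eq]
    constructor
    · intro h
      conv_rhs => rw [h]
      rw [String.toList_ofList]
    · intro h
      apply String.toList_inj.mp
      rw [String.toList_ofList, h]
  rw [hL, hmain, hR]
  constructor
  · intro hall
    apply List.ext_getElem?
    intro k
    by_cases hk : k < w.toList.length
    · rw [List.getElem?_reverse hk]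
      exact (hall k (by omega) (by omega)).symm
    · rw [List.getElem?_eq_none (by simpa using not_lt.mp hk),
         List.getElem?_eq_none (not_lt.mp hk)]
  · intro h k hk1 hk2
    have hk : k < w.toList.length := by omega
    rw [← List.getElem?_reverse hk, h]

-- relation between A's (mayor, largest) state and an Option running-max accumulator
def pvRel (s : Int × String) (o : Option String) : Prop :=
  (s = (0, "") ∧ o = none) ∨ (∃ r, r.toList ≠ [] ∧ s = (PySem.Str.len r, r) ∧ o = some r)

theorem pvRel_step (x : String) (s : Int × String) (o : Option String) (h : pvRel s o) :
    pvRel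
      ((fun (s : Int × String) i =>
        let reverse := (PySem.Str.slice? i none none (-1)).getD ""
        if i == reverse then
          let size := PySem.Str.len i
          if size > s.1 then (size, i) else s
        else s) s x)
      ((fun o x =>
        if pvIsCand x then
          (match o with
            | none => some x
            | some m => if PySem.Str.len m < PySem.Str.len x then some x else some m)
        else o) o x) := by
  rcases h with ⟨h1, h2⟩ | ⟨r, hr, h1, h2⟩ <;> subst h1 <;> subst h2 <;>
    by_cases hp : (x == (PySem.Str.slice? x none none (-1)).getD "") = true
  · by_cases he : x = ""
    · subst he
      simp [pvRel, pvIsCand]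
    · have hx : x.toList ≠ [] := fun hn => he (String.toList_eq_nil_iff.mp hn)
      have hlen : (0 : Int) < PySem.Str.len x := by
        simp only [PySem.Str.len]
        exact_mod_cast List.length_pos_iff.mpr hx
      simp only [pvIsCand, hp, Bool.and_true]
      simp only [if_pos]
      rw [if_pos hlen]
      have : (x != "") = true := by simp [he]
      rw [this]
      exact Or.inr ⟨x, hx, rfl, rfl⟩
  · simp only [pvIsCand, hp, Bool.and_false, Bool.false_eq_true, if_false]
    exact Or.inl ⟨rfl, rfl⟩
  · by_cases he : x = ""
    · subst he
      have h0 : ¬ (PySem.Str.len "" > PySem.Str.len r) := by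
        simp only [PySem.Str.len, gt_iff_lt, not_lt]
        simp
      have hcE : pvIsCand "" = false := rfl
      simp only [hcE, Bool.false_eq_true, if_false, hp, if_true, h0]
      exact Or.inr ⟨r, hr, rfl, rfl⟩
    · have hx : x.toList ≠ [] := fun hn => he (String.toList_eq_nil_iff.mp hn)
      have hc : pvIsCand x = true := by simp [pvIsCand, he, hp]
      simp only [hp, if_true, hc, gt_iff_lt]
      by_cases hlt : PySem.Str.len r < PySem.Str.len x
      · rw [if_pos hlt, if_pos hlt]
        exact Or.inr ⟨x, hx, rfl, rfl⟩
      · rw [if_neg hlt, if_neg hlt]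
        exact Or.inr ⟨r, hr, rfl, rfl⟩
  · have hc : pvIsCand x = false := by simp [pvIsCand, hp]
    simp only [hp, if_false, hc, Bool.false_eq_true]
    exact Or.inr ⟨r, hr, rfl, rfl⟩

theorem pvRel_foldl (words : List String) (s : Int × String) (o : Option String) (h : pvRel s o) :
    pvRel
      (words.foldl (fun (s : Int × String) i =>
        let reverse := (PySem.Str.slice? i none none (-1)).getD ""
        if i == reverse then
          let size := PySem.Str.len i
          if size > s.1 then (size, i) else s
        else s) s)
      (words.foldl (fun o x =>
        if pvIsCand x then
          (match o with
            | none => some x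
            | some m => if PySem.Str.len m < PySem.Str.len x then some x else some m)
        else o) o) := by
  induction words generalizing s o with
  | nil => exact h
  | cons x t ih => exact ih _ _ (pvRel_step x s o h)

-- head of an insertBy step, for the descending-sort comparator
theorem pvInsertBy_head? (bf : String → String → Bool) (x : String) (acc : List String) :
    (PySem.List.insertBy bf x acc).head? =
      some (match acc.head? with
            | none => x
            | some y => if bf x y then x else y) := by
  cases acc with
  | nil => rfl
  | cons y ys =>
    simp only [PySem.List.insertBy, List.head?_cons]
    by_cases h : bf x y = true
    · simp [h]
    · simp [h]

-- the head of the stable descending insertion sort IS the running first-max accumulator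
theorem pvFoldl_insertBy_head? (l : List String) (acc : List String) :
    (l.foldl (fun acc x => PySem.List.insertBy (fun a b => decide (PySem.Str.len b < PySem.Str.len a)) x acc) acc).head? =
      l.foldl (fun o x =>
        (match o with
          | none => some x
          | some m => if PySem.Str.len m < PySem.Str.len x then some x else some m)) acc.head? := by
  induction l generalizing acc with
  | nil => rfl
  | cons x t ih =>
    simp only [List.foldl_cons]
    rw [ih]
    congr 1
    rw [pvInsertBy_head? _ x acc]
    cases acc with
    | nil => rfl
    | cons y ys =>
      simp only [List.head?_cons]
      simp only [decide_eq_true_eq]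
      exact apply_ite some (PySem.Str.len y < PySem.Str.len x) x y

-- ===== VERDICT (by name: the statement is the Claim_ definition above) =====
theorem find_largest_palindrome_spec : Claim_equal_find_largest_palindrome := by
  intro words _
  unfold Spec_find_largest_palindrome find_largest_palindrome find_largest_palindrome_alt
  have h := pvRel_foldl words (0, "") none (Or.inl ⟨rfl, rfl⟩)
  -- B's candidate filter is A's
  have hfilter : words.filter (fun w => (w != "") && pvIsPalindrome w) = words.filter pvIsCand := by
    apply List.filter_congr
    intro w _
    rw [pvIsPalindrome_eq w]
    simp [pvIsCand]
  -- the Option fold equals the head of B's descending sort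
  have E : (PySem.List.sorted (words.filter (fun w => (w != "") && pvIsPalindrome w)) PySem.Str.len true).head?
      = words.foldl (fun o x =>
          if pvIsCand x then
            (match o with
              | none => some x
              | some m => if PySem.Str.len m < PySem.Str.len x then some x else some m)
          else o) none := by
    rw [hfilter, PySem.List.sorted_rev_eq_foldl_insertBy, pvFoldl_insertBy_head?]
    rw [PySem.List.foldl_if_eq_foldl_filter]
    rfl
  rcases h with ⟨h1, h2⟩ | ⟨r, hr, h1, h2⟩
  · have hc : (PySem.List.sorted (words.filter (fun w => (w != "") && pvIsPalindrome w)) PySem.Str.len true).head? = none := E.trans h2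
    rw [List.head?_eq_none_iff] at hc
    simp only [h1, hc]
    simp
  · have hm : (PySem.List.sorted (words.filter (fun w => (w != "") && pvIsPalindrome w)) PySem.Str.len true).head? = some r := E.trans h2
    have hlen : PySem.Str.len r ≠ 0 := by
      simp only [PySem.Str.len]
      exact_mod_cast fun hz => hr (List.length_eq_zero_iff.mp (by exact_mod_cast hz))
    simp only [h1]
    rw [if_neg hlen]
    cases hsort : PySem.List.sorted (words.filter (fun w => (w != "") && pvIsPalindrome w)) PySem.Str.len true with
    | nil => rw [hsort] at hm; simp at hm
    | cons m t => rw [hsort] at hm; simp at hm; simp [hm]
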